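-- pv_equiv track=rewrite | github.com/mufeezmujassir/Travel-cost-estmator-AI-Powered | backend/agents/travel_orchestrator.py | _get_alternative_months
-- ===== SOURCE A (Python) =====
-- from typing import Dict, Any, List
--
-- def _get_alternative_months(optimal_seasons: List[str]) -> List[int]:
--     """Get alternative months for optimal seasons"""
--     season_months = {
--         "winter": [12, 1, 2],
--         "spring": [3, 4, 5],
--         "summer": [6, 7, 8],
--         "autumn": [9, 10, 11]
--     }
--
--     months = []
--     for season in optimal_seasons:
--         months.extend(season_months.get(season, []))
--
--     return sorted(list(set(months)))
-- ===== SOURCE B (Python) =====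
-- def _get_alternative_months(optimal_seasons):
--     """Get alternative months for optimal seasons"""
--     month_season = {
--         12: "winter", 1: "winter", 2: "winter",
--         3: "spring", 4: "spring", 5: "spring",
--         6: "summer", 7: "summer", 8: "summer",
--         9: "autumn", 10: "autumn", 11: "autumn",
--     }
--     wanted = set(optimal_seasons)
--     return [m for m in range(1, 13) if month_season[m] in wanted]
-- ===== Notes on version B (the rewrite author's own statement) =====
-- stated objective: alternative
-- what changed: Instead of gathering each requested season's month list, deduplicating with set() and sorting, B inverts the mapping (month -> season) and makes one ordered pass over months 1..12, keeping a month iff its season was requested, so the sorted unique result falls out directly without any sort or union step.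
import Mathlib
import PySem

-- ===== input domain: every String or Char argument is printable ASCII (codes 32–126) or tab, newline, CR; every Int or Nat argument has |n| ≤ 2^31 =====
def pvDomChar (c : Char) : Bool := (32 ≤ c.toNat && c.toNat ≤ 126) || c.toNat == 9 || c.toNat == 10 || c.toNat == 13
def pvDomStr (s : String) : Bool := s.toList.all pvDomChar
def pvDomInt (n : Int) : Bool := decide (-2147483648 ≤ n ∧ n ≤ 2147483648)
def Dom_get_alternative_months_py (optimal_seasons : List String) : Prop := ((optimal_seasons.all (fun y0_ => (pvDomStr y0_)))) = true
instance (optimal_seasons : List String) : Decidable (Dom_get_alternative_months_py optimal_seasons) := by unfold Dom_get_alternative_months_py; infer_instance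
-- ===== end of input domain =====

-- ===== PORT A =====
-- B replaces A's gather-dedup-sort with one ordered filtering pass over months 1..12 (same cost; different decomposition).
def pvSeasonMonths : PySem.Dict String (List Int) :=
  PySem.Dict.ofList [("winter", [12, 1, 2]), ("spring", [3, 4, 5]),
                     ("summer", [6, 7, 8]), ("autumn", [9, 10, 11])]

def get_alternative_months_py (optimal_seasons : List String) : List Int :=
  let months : List Int :=
    optimal_seasons.foldl (fun acc season => acc ++ pvSeasonMonths.getD season []) []
  PySem.List.sorted (PySem.Set.ofList months) (fun x => x) false

-- ===== PORT B =====
def pvMonthSeason : PySem.Dict Int String :=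
  PySem.Dict.ofList [(12, "winter"), (1, "winter"), (2, "winter"),
                     (3, "spring"), (4, "spring"), (5, "spring"),
                     (6, "summer"), (7, "summer"), (8, "summer"),
                     (9, "autumn"), (10, "autumn"), (11, "autumn")]

-- B's 'month_season[m]': every m in range(1, 13) is a key, so the lookup never raises; getD with "" is exact here.
def get_alternative_months_py_alt (optimal_seasons : List String) : List Int :=
  let wanted : PySem.Set String := PySem.Set.ofList optimal_seasons
  (PySem.List.pyRange 1 13 1).filter
    (fun m => PySem.Set.contains wanted (pvMonthSeason.getD m ""))

-- ===== PRECONDITION & SPEC =====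
def Spec_get_alternative_months_py (optimal_seasons : List String) (out : List Int) : Prop := out = get_alternative_months_py_alt optimal_seasons
instance (optimal_seasons : List String) (out : List Int) : Decidable (Spec_get_alternative_months_py optimal_seasons out) := by unfold Spec_get_alternative_months_py; infer_instance

-- ===== CLAIM (what is proved, stated in full; the proofs are below) =====
def Claim_equal_get_alternative_months_py : Prop := ∀ (optimal_seasons : List String), Dom_get_alternative_months_py optimal_seasons → Spec_get_alternative_months_py optimal_seasons (get_alternative_months_py optimal_seasons)

-- ===== LEMMAS AND PROOFS =====

lemma pvSeasonMonths_eq : pvSeasonMonths = PySem.Dict.mk [("winter", [12, 1, 2]),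
    ("spring", [3, 4, 5]), ("summer", [6, 7, 8]), ("autumn", [9, 10, 11])] := by decide

lemma pvMonthSeason_eq : pvMonthSeason = PySem.Dict.mk [(12, "winter"), (1, "winter"),
    (2, "winter"), (3, "spring"), (4, "spring"), (5, "spring"), (6, "summer"), (7, "summer"),
    (8, "summer"), (9, "autumn"), (10, "autumn"), (11, "autumn")] := by decide

set_option maxRecDepth 8192 in
lemma pvSeasonMonths_getD (s : String) :
    pvSeasonMonths.getD s [] =
      if s = "winter" then [12, 1, 2]
      else if s = "spring" then [3, 4, 5]
      else if s = "summer" then [6, 7, 8]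
      else if s = "autumn" then [9, 10, 11]
      else [] := by
  rw [pvSeasonMonths_eq]
  simp only [PySem.Dict.getD_eq_get?_getD, PySem.Dict.get?_mk_cons, beq_iff_eq]
  split_ifs <;> first | rfl | simp_all [eq_comm]

lemma pv_mem_months_iff (optimal_seasons : List String) (m : Int) :
    m ∈ optimal_seasons.flatMap (fun s => pvSeasonMonths.getD s []) ↔
      (1 ≤ m ∧ m < 13 ∧ pvMonthSeason.getD m "" ∈ optimal_seasons) := by
  rw [List.mem_flatMap]
  constructor
  · rintro ⟨s, hs, hm⟩
    rw [pvSeasonMonths_getD] at hm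
    split_ifs at hm with h1 h2 h3 h4 <;>
      [subst h1; subst h2; subst h3; subst h4; exact absurd hm (by simp)] <;>
      simp only [List.mem_cons, List.not_mem_nil, or_false] at hm <;>
      rcases hm with rfl | rfl | rfl <;>
      refine ⟨by norm_num, by norm_num, ?_⟩ <;>
      simpa [pvMonthSeason_eq, PySem.Dict.getD_eq_get?_getD, PySem.Dict.get?_mk_cons] using hs
  · rintro ⟨h1, h2, hmem⟩
    interval_cases m <;>
      simp only [pvMonthSeason_eq, PySem.Dict.getD_eq_get?_getD, PySem.Dict.get?_mk_cons,
        Int.reduceBEq, if_true, Option.getD_some] at hmem <;>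
      first
      | exact ⟨"winter", hmem, by decide⟩
      | exact ⟨"spring", hmem, by decide⟩
      | exact ⟨"summer", hmem, by decide⟩
      | exact ⟨"autumn", hmem, by decide⟩

-- ===== VERDICT (by name: the statement is the Claim_ definition above) =====
theorem get_alternative_months_py_spec : Claim_equal_get_alternative_months_py := by
  intro xs _
  unfold Spec_get_alternative_months_py get_alternative_months_py get_alternative_months_py_alt
  rw [PySem.List.foldl_append_eq_flatMap]
  simp only [List.nil_append]
  apply PySem.List.sorted_eq_of_perm_of_pairwise_lt
  · rw [List.perm_ext_iff_of_nodup
      (List.Nodup.filter _ (PySem.List.nodup_pyRange_one 1 13)) (PySem.Set.nodup_ofList _)]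
    intro a
    simp only [List.mem_filter, PySem.List.mem_pyRange_one, PySem.Set.mem_ofList,
      PySem.Set.contains_iff, pv_mem_months_iff]
    constructor
    · rintro ⟨⟨h1, h2⟩, h3⟩; exact ⟨h1, h2, h3⟩
    · rintro ⟨h1, h2, h3⟩; exact ⟨⟨h1, h2⟩, h3⟩
  · exact List.Pairwise.filter _ (PySem.List.pairwise_lt_pyRange_one 1 13)
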